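-- pv_equiv track=rewrite | github.com/ghallberg/aoc2022 | day12.py | parse
-- ===== SOURCE A (Python) =====
-- from typing import NamedTuple
--
-- class Pos(NamedTuple):
--     x: int
--     y: int
--
-- def parse(map: list[str], start_sign: str = "S") -> tuple[list[Pos], Pos, list[list[int]]]:
--     start_pos = []
--     end_pos = Pos(0, 0)
--     new_map: list[list[int]] = []
--     for x, line in enumerate(map):
--         new_map.append([])
--         for y, char in enumerate(line.strip()):
--             if char in  [start_sign, "S"]:
--                 start_pos.append(Pos(x, y))
--                 height = ord("a")
--             elif char == "E":
--                 end_pos = Pos(x, y)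
--                 height = ord("z")
--             else:
--                 height = ord(char)
--
--             new_map[x].append(height)
--     return start_pos, end_pos, new_map
-- ===== SOURCE B (Python) =====
-- from typing import NamedTuple
--
-- class Pos(NamedTuple):
--     x: int
--     y: int
--
-- def parse(map: list[str], start_sign: str = "S") -> tuple[list[Pos], Pos, list[list[int]]]:
--     lines = [line.strip() for line in map]
--     heights = {start_sign: ord("a"), "S": ord("a"), "E": ord("z")}
--     new_map = [[heights.get(c, ord(c)) for c in line] for line in lines]
--     start_pos = [Pos(x, y) for x, line in enumerate(lines)
--                  for y, c in enumerate(line) if c in (start_sign, "S")]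
--     end_pos = Pos(0, 0)
--     for x, line in reversed(list(enumerate(lines))):
--         ys = [y for y, c in enumerate(line) if c == "E"]
--         if ys:
--             end_pos = Pos(x, ys[-1])
--             break
--     return start_pos, end_pos, new_map
-- ===== Notes on version B (the rewrite author's own statement) =====
-- stated objective: alternative
-- what changed: Replaces A's single stateful loop with a char->height translation dict applied by comprehension, a separate row-major comprehension for start positions, and a reverse row scan with early break for the last 'E'; Pre_ excludes start_sign == "E", the corner where the start marker collides with the end marker so every 'E' is simultaneously a start and the end and either reading is equally defensible (A reads it as a start, B as the end marker).
import Mathlib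
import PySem

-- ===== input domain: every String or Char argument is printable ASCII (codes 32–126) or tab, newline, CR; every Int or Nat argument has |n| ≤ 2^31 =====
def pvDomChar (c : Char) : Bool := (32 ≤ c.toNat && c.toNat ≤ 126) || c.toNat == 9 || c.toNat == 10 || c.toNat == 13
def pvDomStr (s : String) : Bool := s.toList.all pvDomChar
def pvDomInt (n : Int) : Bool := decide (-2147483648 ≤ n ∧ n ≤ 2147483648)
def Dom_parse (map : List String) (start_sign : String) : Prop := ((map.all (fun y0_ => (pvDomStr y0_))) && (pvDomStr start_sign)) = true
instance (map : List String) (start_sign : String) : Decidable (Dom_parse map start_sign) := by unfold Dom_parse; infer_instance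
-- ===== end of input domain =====

-- B builds the grid by a translation dict, start positions by one comprehension and the
-- end position by a reverse row scan with early break (objective: alternative; return value only).

-- ===== PORT A =====
-- inner for-loop of A over the enumerated stripped line; state = (start_pos, end_pos, current row)
def parseLineA (start_sign : String) (x : Int) (y : Int) (cs : List Char)
    (st : (List (Int × Int)) × (Int × Int) × List Int) :
    (List (Int × Int)) × (Int × Int) × List Int :=
  match cs with
  | [] => st
  | c :: rest =>
    let st' :=
      if String.ofList [c] = start_sign ∨ c = 'S' then
        (st.1 ++ [(x, y)], st.2.1, st.2.2 ++ [((97 : Int))])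
      else if c = 'E' then
        (st.1, (x, y), st.2.2 ++ [((122 : Int))])
      else
        (st.1, st.2.1, st.2.2 ++ [((c.toNat : Int))])
    parseLineA start_sign x (y + 1) rest st'

-- outer for-loop of A over the enumerated lines
def parseLinesA (start_sign : String) (x : Int) (lines : List String)
    (sp : List (Int × Int)) (ep : Int × Int) (nm : List (List Int)) :
    (List (Int × Int)) × (Int × Int) × List (List Int) :=
  match lines with
  | [] => (sp, ep, nm)
  | l :: rest =>
    -- new_map.append([]) then appending heights to new_map[x] builds one fresh row
    let st := parseLineA start_sign x 0 (PySem.Str.strip l).toList (sp, ep, [])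
    parseLinesA start_sign (x + 1) rest st.1 st.2.1 (nm ++ [st.2.2])

def parse (map : List String) (start_sign : String) :
    (List (Int × Int)) × (Int × Int) × List (List Int) :=
  parseLinesA start_sign 0 map [] (0, 0) []

-- ===== PORT B =====
-- the dict literal {start_sign: ord("a"), "S": ord("a"), "E": ord("z")}
def pvHeights (start_sign : String) : PySem.Dict String Int :=
  ((PySem.Dict.empty.insert start_sign 97).insert "S" 97).insert "E" 122

-- the ys comprehension: [y for y, c in enumerate(line) if c == "E"]
def pvEys (line : String) : List Int :=
  (PySem.List.enumerate line.toList 0).filterMap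
    (fun yc => if yc.2 == 'E' then some yc.1 else none)

-- the reverse for-loop over enumerate(lines): first row (from the end) with an 'E' wins
def pvFindEnd : List (Int × String) → Int × Int
  | [] => (0, 0)
  | (x, line) :: rest =>
    match PySem.List.pyGet? (pvEys line) (-1) with   -- `if ys: … ys[-1] … break`
    | some y => (x, y)
    | none => pvFindEnd rest

def parse_alt (map : List String) (start_sign : String) :
    (List (Int × Int)) × (Int × Int) × List (List Int) :=
  let lines := map.map PySem.Str.strip
  let heights := pvHeights start_sign
  let new_map := lines.map (fun line =>
      line.toList.map (fun c => heights.getD (String.ofList [c]) ((c.toNat : Int))))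
  let start_pos := (PySem.List.enumerate lines 0).flatMap (fun xl =>
      (PySem.List.enumerate xl.2.toList 0).filterMap (fun yc =>
        if String.ofList [yc.2] == start_sign || yc.2 == 'S' then some (xl.1, yc.1) else none))
  let end_pos := pvFindEnd (PySem.List.enumerate lines 0).reverse
  (start_pos, end_pos, new_map)

-- ===== PRECONDITION & SPEC =====
-- Pre_ excludes start_sign = "E" (on which A still returns): there the start marker collides
-- with the end marker, so each 'E' is simultaneously a start and the end and either reading is
-- equally defensible; A reads every 'E' as a start cell, B reads it as the end marker.
def Pre_parse (map : List String) (start_sign : String) : Prop := start_sign ≠ "E"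
instance (map : List String) (start_sign : String) : Decidable (Pre_parse map start_sign) := by unfold Pre_parse; infer_instance
def pvWitness_parse : List String × String := (["Sab", "abE"], "S")
def Spec_parse (map : List String) (start_sign : String) (out : (List (Int × Int)) × (Int × Int) × List (List Int)) : Prop := out = parse_alt map start_sign
instance (map : List String) (start_sign : String) (out : (List (Int × Int)) × (Int × Int) × List (List Int)) : Decidable (Spec_parse map start_sign out) := by unfold Spec_parse; infer_instance

-- ===== CLAIM (what is proved, stated in full; the proofs are below) =====
def Claim_equal_parse : Prop := ∀ (map : List String) (start_sign : String), Dom_parse map start_sign → Pre_parse map start_sign → Spec_parse map start_sign (parse map start_sign)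

-- ===== LEMMAS AND PROOFS =====

theorem pv_getLastD_cons {α : Type} (a : α) (l : List α) (d : α) :
    ((a :: l).getLast?).getD d = (l.getLast?).getD a := by
  induction l with
  | nil => rfl
  | cons b t ih =>
    rw [List.getLast?_cons_cons]
    cases hq : (b :: t).getLast? with
    | some v => simp
    | none => simp at hq

theorem pv_getLastD_append {α : Type} (l1 l2 : List α) (d : α) :
    (((l1 ++ l2).getLast?)).getD d = (l2.getLast?).getD ((l1.getLast?).getD d) := by
  induction l1 generalizing d with
  | nil => rfl
  | cons a t ih => simp [pv_getLastD_cons]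

theorem pv_enumerate_map {α β : Type} (g : α → β) (xs : List α) (s : Int) :
    PySem.List.enumerate (xs.map g) s =
      (PySem.List.enumerate xs s).map (fun p => (p.1, g p.2)) := by
  induction xs generalizing s with
  | nil => simp [PySem.List.enumerate_nil]
  | cons a t ih => simp [PySem.List.enumerate_cons, ih]

-- characterisation of A's inner loop
theorem parseLineA_eq (start_sign : String) (x : Int) (cs : List Char) :
    ∀ (y : Int) (sp : List (Int × Int)) (ep : Int × Int) (row : List Int),
    parseLineA start_sign x y cs (sp, ep, row) =
      (sp ++ (PySem.List.enumerate cs y).filterMap (fun yc =>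
          if String.ofList [yc.2] == start_sign || yc.2 == 'S' then some (x, yc.1) else none),
       (((PySem.List.enumerate cs y).filterMap (fun yc =>
          if yc.2 == 'E' && !(String.ofList [yc.2] == start_sign || yc.2 == 'S') then some (x, yc.1) else none)).getLast?).getD ep,
       row ++ cs.map (fun c =>
          if String.ofList [c] = start_sign ∨ c = 'S' then (97 : Int)
          else if c = 'E' then (122 : Int)
          else ((c.toNat : Int)))) := by
  induction cs with
  | nil => intro y sp ep row; simp [parseLineA, PySem.List.enumerate_nil]
  | cons c rest ih =>
    intro y sp ep row
    by_cases hs : String.ofList [c] = start_sign ∨ c = 'S'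
    · have hb : (String.ofList [c] == start_sign || c == 'S') = true := by
        simp; rcases hs with h | h
        · exact Or.inl h
        · exact Or.inr h
      have hc : ¬(c = 'E' ∧ ¬String.ofList [c] = start_sign ∧ ¬c = 'S') := by tauto
      simp [parseLineA, hs, PySem.List.enumerate_cons, hb, ih, hc]
    · have hb : (String.ofList [c] == start_sign || c == 'S') = false := by
        simp; rw [not_or] at hs; exact ⟨hs.1, hs.2⟩
      by_cases he : c = 'E'
      · subst he
        rw [not_or] at hs
        simp [parseLineA, hs.1, PySem.List.enumerate_cons, ih, pv_getLastD_cons]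
      · simp [parseLineA, hs, he, PySem.List.enumerate_cons, ih]

-- characterisation of A's outer loop
theorem parseLinesA_eq (start_sign : String) (lines : List String) :
    ∀ (x : Int) (sp : List (Int × Int)) (ep : Int × Int) (nm : List (List Int)),
    parseLinesA start_sign x lines sp ep nm =
      (sp ++ (PySem.List.enumerate (lines.map (fun l => (PySem.Str.strip l).toList)) x).flatMap (fun xl =>
          (PySem.List.enumerate xl.2 0).filterMap (fun yc =>
            if String.ofList [yc.2] == start_sign || yc.2 == 'S' then some (xl.1, yc.1) else none)),
       (((PySem.List.enumerate (lines.map (fun l => (PySem.Str.strip l).toList)) x).flatMap (fun xl =>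
          (PySem.List.enumerate xl.2 0).filterMap (fun yc =>
            if yc.2 == 'E' && !(String.ofList [yc.2] == start_sign || yc.2 == 'S') then some (xl.1, yc.1) else none))).getLast?).getD ep,
       nm ++ (lines.map (fun l => (PySem.Str.strip l).toList)).map (fun line => line.map (fun c =>
          if String.ofList [c] = start_sign ∨ c = 'S' then (97 : Int)
          else if c = 'E' then (122 : Int)
          else ((c.toNat : Int))))) := by
  induction lines with
  | nil => intro x sp ep nm; simp [parseLinesA, PySem.List.enumerate_nil]
  | cons l rest ih =>
    intro x sp ep nm
    simp only [parseLinesA, parseLineA_eq, List.map_cons, PySem.List.enumerate_cons,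
      List.flatMap_cons, ih, pv_getLastD_append]
    simp [List.append_assoc]

-- height translation: B's dict lookup equals A's branch chain (needs start_sign ≠ "E")
theorem pv_heights_eq (start_sign : String) (hpre : start_sign ≠ "E") (c : Char) :
    (pvHeights start_sign).getD (String.ofList [c]) ((c.toNat : Int)) =
      (if String.ofList [c] = start_sign ∨ c = 'S' then (97 : Int)
       else if c = 'E' then (122 : Int)
       else ((c.toNat : Int))) := by
  have hchar : ∀ d : Char, String.ofList [c] = String.ofList [d] ↔ c = d := by
    intro d
    constructor
    · intro h
      have := congrArg String.toList h
      rw [String.toList_ofList, String.toList_ofList] at this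
      simpa using this
    · intro h; rw [h]
  have hSlit : ("S" : String) = String.ofList ['S'] := rfl
  have hElit : ("E" : String) = String.ofList ['E'] := rfl
  by_cases h1 : String.ofList [c] = start_sign
  · subst h1
    by_cases h2 : c = 'S'
    · subst h2; decide
    · by_cases h3 : c = 'E'
      · subst h3; exact absurd rfl hpre
      · have hS' : ¬ String.ofList [c] = "S" := fun h => h2 ((hchar 'S').mp h)
        have hbe : (String.ofList [c] == "E") = false := by simp; exact hpre
        simp [pvHeights, PySem.Dict.insert, PySem.Dict.empty, PySem.Dict.getD,
          PySem.Dict.get?, PySem.Dict.contains, List.find?, hpre, hS', hbe]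
  · by_cases h2 : c = 'S'
    · subst h2
      have hs : (start_sign == "S") = false := by simp; exact fun h => h1 (by rw [h])
      simp [pvHeights, PySem.Dict.insert, PySem.Dict.empty, PySem.Dict.getD,
        PySem.Dict.get?, List.find?, hs, hpre]
    · by_cases h3 : c = 'E'
      · subst h3
        have he1 : (start_sign == "E") = false := by simp; exact hpre
        by_cases h4 : start_sign = "S"
        · subst h4
          simp [pvHeights, PySem.Dict.insert, PySem.Dict.empty, PySem.Dict.getD,
            PySem.Dict.get?, List.find?]
        · have h6 : (start_sign == "S") = false := by simp; exact h4
          have he2 : ¬"E" = start_sign := fun h => hpre h.symm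
          simp [pvHeights, PySem.Dict.insert, PySem.Dict.empty, PySem.Dict.getD,
            PySem.Dict.get?, PySem.Dict.contains, List.find?, he1, he2, h6, hpre]
      · have hS : ("S" == String.ofList [c]) = false := by
          simp; intro h; exact h2 ((hchar 'S').mp h.symm)
        have hE : ("E" == String.ofList [c]) = false := by
          simp; intro h; exact h3 ((hchar 'E').mp h.symm)
        have h0 : (start_sign == String.ofList [c]) = false := by
          simp; exact fun h => h1 h.symm
        have hS' : ¬ String.ofList [c] = "S" := fun h => h2 ((hchar 'S').mp h)
        have hE' : ¬ String.ofList [c] = "E" := fun h => h3 ((hchar 'E').mp h)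
        by_cases h4 : start_sign = "S"
        · subst h4
          simp [pvHeights, PySem.Dict.insert, PySem.Dict.empty, PySem.Dict.getD,
            PySem.Dict.get?, PySem.Dict.contains, List.find?, hS, hE, hS', hE', h1, h2, h3]
        · have h6 : (start_sign == "S") = false := by simp; exact h4
          have he2 : ¬"E" = start_sign := fun h => hpre h.symm
          simp [pvHeights, PySem.Dict.insert, PySem.Dict.empty, PySem.Dict.getD,
            PySem.Dict.get?, PySem.Dict.contains, List.find?, hS, hE, hS', hE', h0, h6, he2, h1, h2, h3, hpre]

-- with start_sign ≠ "E", A's end-position filter condition is just 'is this char E'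
theorem pv_cond_eq (start_sign : String) (hpre : start_sign ≠ "E") (yc : Int × Char) :
    (yc.2 == 'E' && !(String.ofList [yc.2] == start_sign || yc.2 == 'S')) = (yc.2 == 'E') := by
  by_cases h : yc.2 = 'E'
  · have : String.ofList [yc.2] = "E" := by rw [h]
    simp [h, this, Ne.symm hpre]
  · simp [h]

-- proof-side generalisation of pvFindEnd with an explicit default
def pvFindEndD : List (Int × String) → (Int × Int) → Int × Int
  | [], d => d
  | (x, line) :: rest, d =>
    match PySem.List.pyGet? (pvEys line) (-1) with
    | some y => (x, y)
    | none => pvFindEndD rest d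

theorem pvFindEndD_zero (zs : List (Int × String)) : pvFindEndD zs (0, 0) = pvFindEnd zs := by
  induction zs with
  | nil => rfl
  | cons p rest ih =>
    obtain ⟨x, line⟩ := p
    simp only [pvFindEndD, pvFindEnd, ih]

theorem pvFindEndD_append_singleton (zs : List (Int × String)) (x : Int) (line : String) (d : Int × Int) :
    pvFindEndD (zs ++ [(x, line)]) d =
      pvFindEndD zs (match PySem.List.pyGet? (pvEys line) (-1) with
                     | some y => (x, y)
                     | none => d) := by
  induction zs with
  | nil => rfl
  | cons p rest ih =>
    obtain ⟨x', line'⟩ := p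
    simp only [List.cons_append, pvFindEndD, ih]

-- the last 'E' of the whole grid equals the reverse row scan
theorem pv_end_eq (lines : List String) :
    ∀ (x : Int) (d : Int × Int),
    (((PySem.List.enumerate lines x).flatMap (fun xl =>
        (PySem.List.enumerate xl.2.toList 0).filterMap (fun yc =>
          if yc.2 == 'E' then some (xl.1, yc.1) else none))).getLast?).getD d =
      pvFindEndD (PySem.List.enumerate lines x).reverse d := by
  induction lines with
  | nil => intro x d; simp [PySem.List.enumerate_nil, pvFindEndD]
  | cons l rest ih =>
    intro x d
    have hrow : ((PySem.List.enumerate l.toList 0).filterMap (fun yc =>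
        if yc.2 == 'E' then some ((x, yc.1) : Int × Int) else none)) =
        (pvEys l).map (fun y => (x, y)) := by
      simp only [pvEys, List.map_filterMap]
      apply List.filterMap_congr
      intro yc _
      by_cases h : yc.2 = 'E' <;> simp [h]
    rw [PySem.List.enumerate_cons, List.flatMap_cons, List.reverse_cons,
      pvFindEndD_append_singleton, pv_getLastD_append, hrow, ← ih]
    congr 1
    rw [PySem.List.pyGet?_neg_one, List.getLast?_map]
    cases (pvEys l).getLast? <;> rfl

-- ===== VERDICT (by name: the statement is the Claim_ definition above) =====
theorem parse_spec : Claim_equal_parse := by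
  intro map start_sign _ hpre
  show parse map start_sign = parse_alt map start_sign
  have hheights := funext (pv_heights_eq start_sign hpre)
  rw [parse, parse_alt, parseLinesA_eq]
  simp only [List.nil_append, List.append_nil]
  refine Prod.ext ?_ (Prod.ext ?_ ?_)
  · simp [pv_enumerate_map, List.flatMap_map, List.map_map, Function.comp]
  · simp only [pv_cond_eq start_sign hpre]
    rw [← pvFindEndD_zero, ← pv_end_eq]
    simp [pv_enumerate_map, List.flatMap_map]
  · simp [List.map_map, Function.comp, hheights]
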